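-- pv_equiv track=rewrite | github.com/tamura70/cspsat-jupyter | cspsat/examples/polyomino.py | possibleShapes
-- ===== SOURCE A (Python) =====
-- def possibleShapes(shape0):
--     shapes = set()
--     for shape1 in (shape0, [ (i,-j) for (i,j) in shape0 ]):
--         for shape2 in (shape1, [ (-i,j) for (i,j) in shape1 ]):
--             for shape3 in (shape2, [ (j,i) for (i,j) in shape2 ]):
--                 di = min(i for (i,j) in shape3)
--                 dj = min(j for (i,j) in shape3)
--                 shape4 = sorted([ (i-di,j-dj) for (i,j) in shape3 ])
--                 shapes.add(tuple(shape4))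
--     return sorted(list(shapes))
-- ===== SOURCE B (Python) =====
-- def possibleShapes(shape0):
--     # Orbit closure: normalize the shape once, then repeatedly saturate the set
--     # under the two D4 generators (90-degree rotation and horizontal mirror).
--     # Three saturation rounds are enough: every element of D4 is a word of
--     # length <= 3 in these generators (Cayley diameter of D4 over {r, m} is 3).
--     def canon(cells):
--         di = min(i for (i, j) in cells)
--         dj = min(j for (i, j) in cells)
--         return tuple(sorted((i - di, j - dj) for (i, j) in cells))
--
--     shapes = {canon(shape0)}
--     for _ in range(3):
--         shapes |= {canon([(j, -i) for (i, j) in s]) for s in shapes}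
--         shapes |= {canon([(i, -j) for (i, j) in s]) for s in shapes}
--     return sorted(shapes)
-- ===== Notes on version B (the rewrite author's own statement) =====
-- stated objective: alternative
-- what changed: A enumerates all 8 symmetry variants via three nested binary-choice loops and normalizes each; B instead computes the orbit closure of the single normalized shape, saturating the set under the two D4 generators (90-degree rotation and mirror) for three rounds (the Cayley diameter of D4 over these generators).
import Mathlib
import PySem

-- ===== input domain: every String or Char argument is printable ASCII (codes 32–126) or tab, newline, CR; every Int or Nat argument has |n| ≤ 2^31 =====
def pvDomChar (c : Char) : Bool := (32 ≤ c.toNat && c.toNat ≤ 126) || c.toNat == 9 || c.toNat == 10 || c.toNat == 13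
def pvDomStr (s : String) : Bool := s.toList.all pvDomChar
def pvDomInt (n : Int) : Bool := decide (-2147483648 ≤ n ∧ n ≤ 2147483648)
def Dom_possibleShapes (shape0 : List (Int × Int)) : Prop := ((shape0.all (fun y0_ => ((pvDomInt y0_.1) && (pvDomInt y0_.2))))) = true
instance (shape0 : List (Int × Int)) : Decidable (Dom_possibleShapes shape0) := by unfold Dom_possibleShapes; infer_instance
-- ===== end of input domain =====

-- B replaces A's enumeration of all 8 symmetry transforms by an orbit closure: it saturates the set of
-- normalized shapes under the two D4 generators (90° rotation, mirror) for 3 rounds (alternative; same cost).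
-- Python's lexicographic order on tuples in both sorted() calls is expressed exactly via the
-- order-isomorphic and injective keys (fun p => [p.1, p.2]) resp. (fun s => s.flatMap (fun p => [p.1, p.2])).

-- ===== PORT A =====
def possibleShapes (shape0 : List (Int × Int)) : List (List (Int × Int)) :=
  let shapes : PySem.Set (List (Int × Int)) :=
    ([shape0, shape0.map (fun p => (p.1, -p.2))]).foldl (fun shapes shape1 =>
      ([shape1, shape1.map (fun p => (-p.1, p.2))]).foldl (fun shapes shape2 =>
        ([shape2, shape2.map (fun p => (p.2, p.1))]).foldl (fun shapes shape3 =>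
          let di := (PySem.List.min? (shape3.map (fun p => p.1)) (fun x => x)).getD 0
          let dj := (PySem.List.min? (shape3.map (fun p => p.2)) (fun x => x)).getD 0
          let shape4 := PySem.List.sorted (shape3.map (fun p => (p.1 - di, p.2 - dj))) (fun p => [p.1, p.2])
          PySem.Set.add shapes shape4) shapes) shapes) PySem.Set.empty
  PySem.List.sorted shapes (fun s => s.flatMap (fun p => [p.1, p.2]))

-- ===== PORT B =====
-- B-side helper: canon(cells) of Source B — translate so the minimum coordinates are 0, then sort.
def pvCanon (cells : List (Int × Int)) : List (Int × Int) :=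
  let di := (PySem.List.min? (cells.map (fun p => p.1)) (fun x => x)).getD 0
  let dj := (PySem.List.min? (cells.map (fun p => p.2)) (fun x => x)).getD 0
  PySem.List.sorted (cells.map (fun p => (p.1 - di, p.2 - dj))) (fun p => [p.1, p.2])

def possibleShapes_alt (shape0 : List (Int × Int)) : List (List (Int × Int)) :=
  let shapes0 : PySem.Set (List (Int × Int)) := PySem.Set.add PySem.Set.empty (pvCanon shape0)
  let shapes := (PySem.List.pyRange 0 3 1).foldl (fun shapes _ =>
    let shapes := PySem.Set.update shapes (shapes.map (fun s => pvCanon (s.map (fun p => (p.2, -p.1)))))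
    let shapes := PySem.Set.update shapes (shapes.map (fun s => pvCanon (s.map (fun p => (p.1, -p.2)))))
    shapes) shapes0
  PySem.List.sorted shapes (fun s => s.flatMap (fun p => [p.1, p.2]))

-- ===== PRECONDITION & SPEC =====
-- Pre_ excludes only the empty list, on which A's min() raises ValueError (B raises there too).
def Pre_possibleShapes (shape0 : List (Int × Int)) : Prop := shape0 ≠ []
instance (shape0 : List (Int × Int)) : Decidable (Pre_possibleShapes shape0) := by
  unfold Pre_possibleShapes; infer_instance
def pvWitness_possibleShapes : (List (Int × Int)) := [(0, 0), (0, 1)]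
def Spec_possibleShapes (shape0 : List (Int × Int)) (out : List (List (Int × Int))) : Prop :=
  out = possibleShapes_alt shape0
instance (shape0 : List (Int × Int)) (out : List (List (Int × Int))) : Decidable (Spec_possibleShapes shape0 out) := by unfold Spec_possibleShapes; infer_instance

-- ===== CLAIM (what is proved, stated in full; the proofs are below) =====
def Claim_equal_possibleShapes : Prop := ∀ (shape0 : List (Int × Int)), Dom_possibleShapes shape0 → Pre_possibleShapes shape0 → Spec_possibleShapes shape0 (possibleShapes shape0)

-- ===== LEMMAS AND PROOFS =====

-- unfolding equation for pvCanon (definitional)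
lemma pvCanon_eq (cells : List (Int × Int)) :
    pvCanon cells = PySem.List.sorted
      (cells.map (fun p => (p.1 - (PySem.List.min? (cells.map (fun p => p.1)) (fun x => x)).getD 0,
                            p.2 - (PySem.List.min? (cells.map (fun p => p.2)) (fun x => x)).getD 0)))
      (fun p => [p.1, p.2]) := rfl

lemma pvPairKey_inj : Function.Injective (fun p : Int × Int => ([p.1, p.2] : List Int)) := by
  intro a1 a2 h
  simp only [List.cons.injEq, and_true] at h
  exact Prod.ext h.1 h.2

lemma pvFlat_inj : Function.Injective (fun s : List (Int × Int) => s.flatMap (fun p => [p.1, p.2])) := by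
  intro l1 l2 h
  induction l1 generalizing l2 with
  | nil => cases l2 with
    | nil => rfl
    | cons b t => simp [List.flatMap_cons] at h
  | cons a t ih =>
    cases l2 with
    | nil => simp [List.flatMap_cons] at h
    | cons b t2 =>
      simp only [List.flatMap_cons, List.cons_append, List.nil_append, List.cons.injEq] at h
      obtain ⟨h1, h2, h3⟩ := h
      exact by simp [Prod.ext_iff, h1, h2, ih h3]

lemma pvMin_id_perm {l1 l2 : List Int} (h : l1.Perm l2) :
    PySem.List.min? l1 (fun x => x) = PySem.List.min? l2 (fun x => x) := by
  cases h1 : PySem.List.min? l1 (fun x => x) with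
  | none =>
    rw [PySem.List.min?_eq_none_iff] at h1
    subst h1
    rw [← h.nil_eq]
    rfl
  | some m =>
    cases h2 : PySem.List.min? l2 (fun x => x) with
    | none =>
      rw [PySem.List.min?_eq_none_iff] at h2
      subst h2
      rw [← h.symm.nil_eq] at h1
      exact absurd h1 (by simp [PySem.List.min?])
    | some m2 =>
      have hm1 := PySem.List.min?_mem h1
      have hm2 := PySem.List.min?_mem h2
      have hle1 := PySem.List.min?_isMin h1
      have hle2 := PySem.List.min?_isMin h2
      exact congrArg some (le_antisymm (hle1 _ (h.symm.mem_iff.mp hm2)) (hle2 _ (h.mem_iff.mp hm1)))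

lemma pvFoldlMinSub (t : List Int) (x a : Int) :
    (t.map (fun v => v - a)).foldl min (x - a) = t.foldl min x - a := by
  induction t generalizing x with
  | nil => rfl
  | cons y t ih => simpa only [List.map_cons, List.foldl_cons, min_sub_sub_right] using ih (min x y)

lemma pvMin_shift (l : List Int) (a : Int) :
    PySem.List.min? (l.map (fun v => v - a)) (fun x => x)
      = (PySem.List.min? l (fun x => x)).map (fun v => v - a) := by
  cases l with
  | nil => rfl
  | cons x t =>
    rw [List.map_cons, PySem.List.min?_id_cons, PySem.List.min?_id_cons]
    simp only [Option.map_some]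
    exact congrArg some (pvFoldlMinSub t x a)

-- pvCanon depends only on the multiset of cells
lemma pvCanon_perm {xs ys : List (Int × Int)} (h : xs.Perm ys) : pvCanon xs = pvCanon ys := by
  rw [pvCanon_eq, pvCanon_eq,
    pvMin_id_perm (h.map (fun p : Int × Int => p.1)),
    pvMin_id_perm (h.map (fun p : Int × Int => p.2))]
  rw [show (fun (a b : List Int) => a.decidableLT b) = (LinearOrder.toDecidableLT (α := List Int)) from
    Subsingleton.elim _ _]
  exact PySem.List.sorted_eq_sorted_of_perm _ _ _ pvPairKey_inj (h.map _)

-- pvCanon is invariant under translating every cell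
lemma pvCanon_translate (u : List (Int × Int)) (a b : Int) :
    pvCanon (u.map (fun q => (q.1 - a, q.2 - b))) = pvCanon u := by
  cases u with
  | nil => rfl
  | cons x t =>
    rw [pvCanon_eq, pvCanon_eq]
    have e1 : ((x :: t).map (fun q : Int × Int => (q.1 - a, q.2 - b))).map (fun p : Int × Int => p.1)
        = ((x :: t).map (fun p : Int × Int => p.1)).map (fun v => v - a) := by
      simp only [List.map_map]; rfl
    have e2 : ((x :: t).map (fun q : Int × Int => (q.1 - a, q.2 - b))).map (fun p : Int × Int => p.2)
        = ((x :: t).map (fun p : Int × Int => p.2)).map (fun v => v - b) := by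
      simp only [List.map_map]; rfl
    rw [e1, e2, pvMin_shift, pvMin_shift, List.map_cons, PySem.List.min?_id_cons,
      List.map_cons, PySem.List.min?_id_cons]
    simp only [Option.map_some, Option.getD_some]
    congr 1
    rw [List.map_map]
    apply List.map_congr_left
    intro p _
    apply Prod.ext <;> dsimp [Function.comp] <;> ring

-- normalizing first does not change the normal form of a linearly transformed shape
lemma pvCanon_map_canon (f : Int × Int → Int × Int)
    (hf : ∀ p c : Int × Int, f (p.1 - c.1, p.2 - c.2) = ((f p).1 - (f c).1, (f p).2 - (f c).2))
    (t : List (Int × Int)) :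
    pvCanon ((pvCanon t).map f) = pvCanon (t.map f) := by
  have hp : (pvCanon t).Perm
      (t.map (fun p => (p.1 - (PySem.List.min? (t.map (fun p => p.1)) (fun x => x)).getD 0,
                        p.2 - (PySem.List.min? (t.map (fun p => p.2)) (fun x => x)).getD 0))) := by
    rw [pvCanon_eq]; exact PySem.List.sorted_perm _ _ _
  set di := (PySem.List.min? (t.map (fun p => p.1)) (fun x => x)).getD 0 with hdi
  set dj := (PySem.List.min? (t.map (fun p => p.2)) (fun x => x)).getD 0 with hdj
  calc pvCanon ((pvCanon t).map f)
      = pvCanon ((t.map (fun p => (p.1 - di, p.2 - dj))).map f) := pvCanon_perm (hp.map f)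
    _ = pvCanon ((t.map f).map (fun q => (q.1 - (f (di, dj)).1, q.2 - (f (di, dj)).2))) := by
        rw [List.map_map, List.map_map]
        exact congrArg pvCanon (List.map_congr_left (fun p _ => by
          have h := hf p (di, dj)
          simpa [Function.comp] using h))
    _ = pvCanon ((t.map f)) := pvCanon_translate _ _ _

lemma pvHf_rot : ∀ p c : Int × Int,
    (fun p : Int × Int => (p.2, -p.1)) (p.1 - c.1, p.2 - c.2)
      = (((fun p : Int × Int => (p.2, -p.1)) p).1 - ((fun p : Int × Int => (p.2, -p.1)) c).1,
         ((fun p : Int × Int => (p.2, -p.1)) p).2 - ((fun p : Int × Int => (p.2, -p.1)) c).2) := by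
  intro p c; apply Prod.ext <;> dsimp <;> ring

lemma pvHf_mir : ∀ p c : Int × Int,
    (fun p : Int × Int => (p.1, -p.2)) (p.1 - c.1, p.2 - c.2)
      = (((fun p : Int × Int => (p.1, -p.2)) p).1 - ((fun p : Int × Int => (p.1, -p.2)) c).1,
         ((fun p : Int × Int => (p.1, -p.2)) p).2 - ((fun p : Int × Int => (p.1, -p.2)) c).2) := by
  intro p c; apply Prod.ext <;> dsimp <;> ring

-- the eight canonical forms A builds, written with the composite transforms collapsed
def pvB8 (s : List (Int × Int)) : List (List (Int × Int)) :=
  [pvCanon s,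
   pvCanon (s.map (fun p => (p.2, p.1))),
   pvCanon (s.map (fun p => (-p.1, p.2))),
   pvCanon (s.map (fun p => (p.2, -p.1))),
   pvCanon (s.map (fun p => (p.1, -p.2))),
   pvCanon (s.map (fun p => (-p.2, p.1))),
   pvCanon (s.map (fun p => (-p.1, -p.2))),
   pvCanon (s.map (fun p => (-p.2, -p.1)))]

-- the eight canonical forms exactly as A's nested loops build them, in A's insertion order
def pvA8 (s : List (Int × Int)) : List (List (Int × Int)) :=
  [pvCanon s,
   pvCanon (s.map (fun p => (p.2, p.1))),
   pvCanon (s.map (fun p => (-p.1, p.2))),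
   pvCanon ((s.map (fun p => (-p.1, p.2))).map (fun p => (p.2, p.1))),
   pvCanon (s.map (fun p => (p.1, -p.2))),
   pvCanon ((s.map (fun p => (p.1, -p.2))).map (fun p => (p.2, p.1))),
   pvCanon ((s.map (fun p => (p.1, -p.2))).map (fun p => (-p.1, p.2))),
   pvCanon (((s.map (fun p => (p.1, -p.2))).map (fun p => (-p.1, p.2))).map (fun p => (p.2, p.1)))]

-- the add-chain both ports build is Set.ofList of the listed elements (definitional)
lemma pvOfList8 (x1 x2 x3 x4 x5 x6 x7 x8 : List (Int × Int)) :
    ((((((((PySem.Set.empty.add x1).add x2).add x3).add x4).add x5).add x6).add x7).add x8)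
      = PySem.Set.ofList [x1, x2, x3, x4, x5, x6, x7, x8] := rfl

set_option maxHeartbeats 1000000 in
lemma pvA_eq (s : List (Int × Int)) :
    possibleShapes s = PySem.List.sorted (PySem.Set.ofList (pvA8 s))
      (fun l => l.flatMap (fun p => [p.1, p.2])) := by
  simp only [possibleShapes, List.foldl_cons, List.foldl_nil]
  rw [pvOfList8]
  rfl

lemma pvA8_collapse (s : List (Int × Int)) : pvA8 s = pvB8 s := by
  simp only [pvA8, pvB8, List.map_map]
  rfl

-- B's loop, written out: the start set and one saturation step per generator
def pvS0 (s : List (Int × Int)) : PySem.Set (List (Int × Int)) :=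
  PySem.Set.add PySem.Set.empty (pvCanon s)

def pvEr (S : PySem.Set (List (Int × Int))) : PySem.Set (List (Int × Int)) :=
  PySem.Set.update S (S.map (fun t => pvCanon (t.map (fun p => (p.2, -p.1)))))

def pvEm (S : PySem.Set (List (Int × Int))) : PySem.Set (List (Int × Int)) :=
  PySem.Set.update S (S.map (fun t => pvCanon (t.map (fun p => (p.1, -p.2)))))

lemma pvB_eq (s : List (Int × Int)) :
    possibleShapes_alt s = PySem.List.sorted (pvEm (pvEr (pvEm (pvEr (pvEm (pvEr (pvS0 s)))))))
      (fun l => l.flatMap (fun p => [p.1, p.2])) := by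
  simp only [possibleShapes_alt]
  rw [show PySem.List.pyRange 0 3 1 = [0, 1, 2] from by decide]
  simp only [List.foldl_cons, List.foldl_nil]
  rfl

lemma pvMem_Er_iff (S : PySem.Set (List (Int × Int))) (x : List (Int × Int)) :
    x ∈ pvEr S ↔ x ∈ S ∨ ∃ t ∈ S, x = pvCanon (t.map (fun p => (p.2, -p.1))) := by
  unfold pvEr
  rw [PySem.Set.mem_update]
  simp only [List.mem_map]
  constructor
  · rintro (h | ⟨t, ht, rfl⟩)
    · exact Or.inl h
    · exact Or.inr ⟨t, ht, rfl⟩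
  · rintro (h | ⟨t, ht, rfl⟩)
    · exact Or.inl h
    · exact Or.inr ⟨t, ht, rfl⟩

lemma pvMem_Em_iff (S : PySem.Set (List (Int × Int))) (x : List (Int × Int)) :
    x ∈ pvEm S ↔ x ∈ S ∨ ∃ t ∈ S, x = pvCanon (t.map (fun p => (p.1, -p.2))) := by
  unfold pvEm
  rw [PySem.Set.mem_update]
  simp only [List.mem_map]
  constructor
  · rintro (h | ⟨t, ht, rfl⟩)
    · exact Or.inl h
    · exact Or.inr ⟨t, ht, rfl⟩
  · rintro (h | ⟨t, ht, rfl⟩)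
    · exact Or.inl h
    · exact Or.inr ⟨t, ht, rfl⟩

lemma pvEr_mono {S : PySem.Set (List (Int × Int))} {x : List (Int × Int)} (h : x ∈ S) :
    x ∈ pvEr S := (pvMem_Er_iff S x).mpr (Or.inl h)

lemma pvEm_mono {S : PySem.Set (List (Int × Int))} {x : List (Int × Int)} (h : x ∈ S) :
    x ∈ pvEm S := (pvMem_Em_iff S x).mpr (Or.inl h)

lemma pvEr_step {S : PySem.Set (List (Int × Int))} {t : List (Int × Int)} (h : t ∈ S) :
    pvCanon (t.map (fun p => (p.2, -p.1))) ∈ pvEr S :=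
  (pvMem_Er_iff S _).mpr (Or.inr ⟨t, h, rfl⟩)

lemma pvEm_step {S : PySem.Set (List (Int × Int))} {t : List (Int × Int)} (h : t ∈ S) :
    pvCanon (t.map (fun p => (p.1, -p.2))) ∈ pvEm S :=
  (pvMem_Em_iff S _).mpr (Or.inr ⟨t, h, rfl⟩)

-- pvB8 is closed under rotating and mirroring a canonical form
lemma pvB8_closed_rot (s : List (Int × Int)) (x : List (Int × Int)) (hx : x ∈ pvB8 s) :
    pvCanon (x.map (fun p => (p.2, -p.1))) ∈ pvB8 s := by
  simp only [pvB8, List.mem_cons, List.not_mem_nil, or_false] at hx ⊢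
  rcases hx with h | h | h | h | h | h | h | h <;> subst h
  · exact Or.inr (Or.inr (Or.inr (Or.inl (pvCanon_map_canon _ pvHf_rot s))))
  · refine Or.inr (Or.inr (Or.inr (Or.inr (Or.inl ?_))))
    rw [pvCanon_map_canon _ pvHf_rot, List.map_map,
      show ((fun p : Int × Int => (p.2, -p.1)) ∘ (fun p : Int × Int => (p.2, p.1)))
        = (fun p : Int × Int => (p.1, -p.2)) from funext fun p => by apply Prod.ext <;> dsimp <;> ring]
  · refine Or.inr (Or.inl ?_)
    rw [pvCanon_map_canon _ pvHf_rot, List.map_map,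
      show ((fun p : Int × Int => (p.2, -p.1)) ∘ (fun p : Int × Int => (-p.1, p.2)))
        = (fun p : Int × Int => (p.2, p.1)) from funext fun p => by apply Prod.ext <;> dsimp <;> ring]
  · refine Or.inr (Or.inr (Or.inr (Or.inr (Or.inr (Or.inr (Or.inl ?_))))))
    rw [pvCanon_map_canon _ pvHf_rot, List.map_map,
      show ((fun p : Int × Int => (p.2, -p.1)) ∘ (fun p : Int × Int => (p.2, -p.1)))
        = (fun p : Int × Int => (-p.1, -p.2)) from funext fun p => by apply Prod.ext <;> dsimp <;> ring]
  · refine Or.inr (Or.inr (Or.inr (Or.inr (Or.inr (Or.inr (Or.inr ?_))))))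
    rw [pvCanon_map_canon _ pvHf_rot, List.map_map,
      show ((fun p : Int × Int => (p.2, -p.1)) ∘ (fun p : Int × Int => (p.1, -p.2)))
        = (fun p : Int × Int => (-p.2, -p.1)) from funext fun p => by apply Prod.ext <;> dsimp <;> ring]
  · refine Or.inl ?_
    rw [pvCanon_map_canon _ pvHf_rot, List.map_map,
      show ((fun p : Int × Int => (p.2, -p.1)) ∘ (fun p : Int × Int => (-p.2, p.1)))
        = (fun p : Int × Int => p) from funext fun p => by apply Prod.ext <;> dsimp <;> ring,
      List.map_id']
  · refine Or.inr (Or.inr (Or.inr (Or.inr (Or.inr (Or.inl ?_)))))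
    rw [pvCanon_map_canon _ pvHf_rot, List.map_map,
      show ((fun p : Int × Int => (p.2, -p.1)) ∘ (fun p : Int × Int => (-p.1, -p.2)))
        = (fun p : Int × Int => (-p.2, p.1)) from funext fun p => by apply Prod.ext <;> dsimp <;> ring]
  · refine Or.inr (Or.inr (Or.inl ?_))
    rw [pvCanon_map_canon _ pvHf_rot, List.map_map,
      show ((fun p : Int × Int => (p.2, -p.1)) ∘ (fun p : Int × Int => (-p.2, -p.1)))
        = (fun p : Int × Int => (-p.1, p.2)) from funext fun p => by apply Prod.ext <;> dsimp <;> ring]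

lemma pvB8_closed_mir (s : List (Int × Int)) (x : List (Int × Int)) (hx : x ∈ pvB8 s) :
    pvCanon (x.map (fun p => (p.1, -p.2))) ∈ pvB8 s := by
  simp only [pvB8, List.mem_cons, List.not_mem_nil, or_false] at hx ⊢
  rcases hx with h | h | h | h | h | h | h | h <;> subst h
  · exact Or.inr (Or.inr (Or.inr (Or.inr (Or.inl (pvCanon_map_canon _ pvHf_mir s)))))
  · refine Or.inr (Or.inr (Or.inr (Or.inl ?_)))
    rw [pvCanon_map_canon _ pvHf_mir, List.map_map,
      show ((fun p : Int × Int => (p.1, -p.2)) ∘ (fun p : Int × Int => (p.2, p.1)))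
        = (fun p : Int × Int => (p.2, -p.1)) from funext fun p => by apply Prod.ext <;> dsimp <;> ring]
  · refine Or.inr (Or.inr (Or.inr (Or.inr (Or.inr (Or.inr (Or.inl ?_))))))
    rw [pvCanon_map_canon _ pvHf_mir, List.map_map,
      show ((fun p : Int × Int => (p.1, -p.2)) ∘ (fun p : Int × Int => (-p.1, p.2)))
        = (fun p : Int × Int => (-p.1, -p.2)) from funext fun p => by apply Prod.ext <;> dsimp <;> ring]
  · refine Or.inr (Or.inl ?_)
    rw [pvCanon_map_canon _ pvHf_mir, List.map_map,
      show ((fun p : Int × Int => (p.1, -p.2)) ∘ (fun p : Int × Int => (p.2, -p.1)))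
        = (fun p : Int × Int => (p.2, p.1)) from funext fun p => by apply Prod.ext <;> dsimp <;> ring]
  · refine Or.inl ?_
    rw [pvCanon_map_canon _ pvHf_mir, List.map_map,
      show ((fun p : Int × Int => (p.1, -p.2)) ∘ (fun p : Int × Int => (p.1, -p.2)))
        = (fun p : Int × Int => p) from funext fun p => by apply Prod.ext <;> dsimp <;> ring,
      List.map_id']
  · refine Or.inr (Or.inr (Or.inr (Or.inr (Or.inr (Or.inr (Or.inr ?_))))))
    rw [pvCanon_map_canon _ pvHf_mir, List.map_map,
      show ((fun p : Int × Int => (p.1, -p.2)) ∘ (fun p : Int × Int => (-p.2, p.1)))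
        = (fun p : Int × Int => (-p.2, -p.1)) from funext fun p => by apply Prod.ext <;> dsimp <;> ring]
  · refine Or.inr (Or.inr (Or.inl ?_))
    rw [pvCanon_map_canon _ pvHf_mir, List.map_map,
      show ((fun p : Int × Int => (p.1, -p.2)) ∘ (fun p : Int × Int => (-p.1, -p.2)))
        = (fun p : Int × Int => (-p.1, p.2)) from funext fun p => by apply Prod.ext <;> dsimp <;> ring]
  · refine Or.inr (Or.inr (Or.inr (Or.inr (Or.inr (Or.inl ?_)))))
    rw [pvCanon_map_canon _ pvHf_mir, List.map_map,
      show ((fun p : Int × Int => (p.1, -p.2)) ∘ (fun p : Int × Int => (-p.2, -p.1)))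
        = (fun p : Int × Int => (-p.2, p.1)) from funext fun p => by apply Prod.ext <;> dsimp <;> ring]

-- rotating/mirroring an already-normalized transformed shape, with the composite collapsed
lemma pvRotOf (s : List (Int × Int)) (g g' : Int × Int → Int × Int)
    (hg : ∀ p, (fun p : Int × Int => (p.2, -p.1)) (g p) = g' p) :
    pvCanon ((pvCanon (s.map g)).map (fun p => (p.2, -p.1))) = pvCanon (s.map g') := by
  rw [pvCanon_map_canon _ pvHf_rot, List.map_map]
  exact congrArg pvCanon (List.map_congr_left fun p _ => hg p)

lemma pvMirOf (s : List (Int × Int)) (g g' : Int × Int → Int × Int)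
    (hg : ∀ p, (fun p : Int × Int => (p.1, -p.2)) (g p) = g' p) :
    pvCanon ((pvCanon (s.map g)).map (fun p => (p.1, -p.2))) = pvCanon (s.map g') := by
  rw [pvCanon_map_canon _ pvHf_mir, List.map_map]
  exact congrArg pvCanon (List.map_congr_left fun p _ => hg p)

-- the saturated set holds exactly A's eight canonical forms
lemma pvF_mem_iff (s : List (Int × Int)) (x : List (Int × Int)) :
    x ∈ pvEm (pvEr (pvEm (pvEr (pvEm (pvEr (pvS0 s)))))) ↔ x ∈ pvB8 s := by
  constructor
  · -- forward: everything the closure reaches is one of the eight forms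
    have base : ∀ y ∈ pvS0 s, y ∈ pvB8 s := by
      intro y hy
      simp only [pvS0, PySem.Set.mem_add] at hy
      rcases hy with hy | hy
      · exact absurd hy (List.not_mem_nil)
      · subst hy; simp [pvB8]
    have stepR : ∀ (S : PySem.Set (List (Int × Int))), (∀ y ∈ S, y ∈ pvB8 s) →
        ∀ y ∈ pvEr S, y ∈ pvB8 s := by
      intro S hS y hy
      rcases (pvMem_Er_iff S y).mp hy with h | ⟨t, ht, rfl⟩
      · exact hS y h
      · exact pvB8_closed_rot s t (hS t ht)
    have stepM : ∀ (S : PySem.Set (List (Int × Int))), (∀ y ∈ S, y ∈ pvB8 s) →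
        ∀ y ∈ pvEm S, y ∈ pvB8 s := by
      intro S hS y hy
      rcases (pvMem_Em_iff S y).mp hy with h | ⟨t, ht, rfl⟩
      · exact hS y h
      · exact pvB8_closed_mir s t (hS t ht)
    exact fun hx => stepM _ (stepR _ (stepM _ (stepR _ (stepM _ (stepR _ base))))) x hx
  · -- backward: each of the eight forms is reached within three rounds
    intro hx
    have c1 : pvCanon s ∈ pvS0 s := by simp [pvS0]
    -- rotation of the base form (round 1)
    have e4 : pvCanon (s.map (fun p => (p.2, -p.1))) ∈ pvEr (pvS0 s) :=
      (pvCanon_map_canon (fun p : Int × Int => (p.2, -p.1)) pvHf_rot s) ▸ pvEr_step c1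
    -- mirror of the base form (round 1)
    have e5 : pvCanon (s.map (fun p => (p.1, -p.2))) ∈ pvEm (pvEr (pvS0 s)) :=
      (pvCanon_map_canon (fun p : Int × Int => (p.1, -p.2)) pvHf_mir s) ▸ pvEm_step (pvEr_mono c1)
    -- mirror after rotation (round 1): the transpose
    have e2 : pvCanon (s.map (fun p => (p.2, p.1))) ∈ pvEm (pvEr (pvS0 s)) :=
      (pvMirOf s (fun p => (p.2, -p.1)) (fun p => (p.2, p.1)) (fun p => by apply Prod.ext <;> dsimp <;> ring)) ▸ pvEm_step e4
    -- second rotation (round 2)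
    have e7 : pvCanon (s.map (fun p => (-p.1, -p.2))) ∈ pvEr (pvEm (pvEr (pvS0 s))) :=
      (pvRotOf s (fun p => (p.2, -p.1)) (fun p => (-p.1, -p.2)) (fun p => by apply Prod.ext <;> dsimp <;> ring)) ▸ pvEr_step (pvEm_mono e4)
    -- rotation of the mirror (round 2)
    have e8 : pvCanon (s.map (fun p => (-p.2, -p.1))) ∈ pvEr (pvEm (pvEr (pvS0 s))) :=
      (pvRotOf s (fun p => (p.1, -p.2)) (fun p => (-p.2, -p.1)) (fun p => by apply Prod.ext <;> dsimp <;> ring)) ▸ pvEr_step e5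
    -- third rotation (round 3)
    have e6 : pvCanon (s.map (fun p => (-p.2, p.1))) ∈ pvEr (pvEm (pvEr (pvEm (pvEr (pvS0 s))))) :=
      (pvRotOf s (fun p => (-p.1, -p.2)) (fun p => (-p.2, p.1)) (fun p => by apply Prod.ext <;> dsimp <;> ring)) ▸ pvEr_step (pvEm_mono e7)
    -- rotation of e8 (round 3)
    have e3 : pvCanon (s.map (fun p => (-p.1, p.2))) ∈ pvEr (pvEm (pvEr (pvEm (pvEr (pvS0 s))))) :=
      (pvRotOf s (fun p => (-p.2, -p.1)) (fun p => (-p.1, p.2)) (fun p => by apply Prod.ext <;> dsimp <;> ring)) ▸ pvEr_step (pvEm_mono e8)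
    simp only [pvB8, List.mem_cons, List.not_mem_nil, or_false] at hx
    rcases hx with h | h | h | h | h | h | h | h <;> subst h
    · exact pvEm_mono (pvEr_mono (pvEm_mono (pvEr_mono (pvEm_mono (pvEr_mono c1)))))
    · exact pvEm_mono (pvEr_mono (pvEm_mono (pvEr_mono e2)))
    · exact pvEm_mono e3
    · exact pvEm_mono (pvEr_mono (pvEm_mono (pvEr_mono (pvEm_mono e4))))
    · exact pvEm_mono (pvEr_mono (pvEm_mono (pvEr_mono e5)))
    · exact pvEm_mono e6
    · exact pvEm_mono (pvEr_mono (pvEm_mono e7))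
    · exact pvEm_mono (pvEr_mono (pvEm_mono e8))

-- sorted(list(set)) with the injective flatten key depends only on the set's elements
lemma pvSorted_congr (xs ys : List (List (Int × Int))) (hperm : xs.Perm ys) :
    PySem.List.sorted xs (fun s : List (Int × Int) => s.flatMap (fun p => [p.1, p.2])) =
    PySem.List.sorted ys (fun s : List (Int × Int) => s.flatMap (fun p => [p.1, p.2])) := by
  rw [show (fun (a b : List Int) => a.decidableLT b) = (LinearOrder.toDecidableLT (α := List Int)) from
    Subsingleton.elim _ _]
  exact PySem.List.sorted_eq_sorted_of_perm _ _ _ pvFlat_inj hperm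

lemma pvF_nodup (s : List (Int × Int)) :
    (pvEm (pvEr (pvEm (pvEr (pvEm (pvEr (pvS0 s))))))).Nodup := by
  have h0 : (pvS0 s).Nodup := PySem.Set.nodup_add _ _ List.nodup_nil
  have hr : ∀ S : PySem.Set (List (Int × Int)), S.Nodup → (pvEr S).Nodup := by
    intro S hS; exact PySem.Set.nodup_update _ _ hS
  have hm : ∀ S : PySem.Set (List (Int × Int)), S.Nodup → (pvEm S).Nodup := by
    intro S hS; exact PySem.Set.nodup_update _ _ hS
  exact hm _ (hr _ (hm _ (hr _ (hm _ (hr _ h0)))))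

-- ===== VERDICT (by name: the statement is the Claim_ definition above) =====
theorem possibleShapes_spec : Claim_equal_possibleShapes := by
  intro s _ _
  unfold Spec_possibleShapes
  rw [pvA_eq, pvB_eq, pvA8_collapse]
  apply pvSorted_congr
  rw [List.perm_ext_iff_of_nodup (PySem.Set.nodup_ofList _) (pvF_nodup s)]
  intro a
  rw [PySem.Set.mem_ofList]
  exact (pvF_mem_iff s a).symm
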